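-- pv_equiv track=rewrite | github.com/lelilia/advent_of_code_2022 | day10.py | solve
-- ===== SOURCE A (Python) =====
-- def solve(input):
--     X = 1
--     clock = 1
--     part_1 = 0
--     part_2 = ""
--     crt = 0
--     for line in input.replace(" ", "\n").split("\n"):
--         if (clock - 1) % 40 == 0:
--             crt = 0
--             part_2 += "\n"
--         if abs(X - crt) <= 1:
--             part_2 += "#"
--         else:
--             part_2 += "."
--         if not line.isalpha():
--             value = int(line)
--             X += value
--         clock += 1
--         crt += 1
--         if clock % 40 == 20:
--             part_1 += clock * X
--     return part_1, part_2
-- ===== SOURCE B (Python) =====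
-- def solve(input):
--     # Pass 1: record X at the start of every cycle, plus the final X.
--     xs = []
--     x = 1
--     for tok in input.replace(" ", "\n").split("\n"):
--         xs.append(x)
--         if not tok.isalpha():
--             x += int(tok)
--     xs.append(x)
--     # Pass 2: signal strengths at cycles 20, 60, 100, ...
--     part_1 = sum(c * v for c, v in enumerate(xs, 1) if c % 40 == 20)
--     # Pass 3: draw the screen; pixel i (0-based) sits at column i % 40.
--     part_2 = "".join(
--         ("\n" if i % 40 == 0 else "") + ("#" if abs(v - i % 40) <= 1 else ".")
--         for i, v in enumerate(xs[:-1]))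
--     return part_1, part_2
-- ===== Notes on version B (the rewrite author's own statement) =====
-- stated objective: alternative
-- what changed: A simulates the CRT in one interleaved loop carrying X/clock/part_1/part_2/crt together; B first records the register value at the start of every cycle in a list, then computes the signal-strength sum and the screen in two separate passes over that list, deriving the beam column as i % 40 instead of a reset counter.
import Mathlib
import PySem

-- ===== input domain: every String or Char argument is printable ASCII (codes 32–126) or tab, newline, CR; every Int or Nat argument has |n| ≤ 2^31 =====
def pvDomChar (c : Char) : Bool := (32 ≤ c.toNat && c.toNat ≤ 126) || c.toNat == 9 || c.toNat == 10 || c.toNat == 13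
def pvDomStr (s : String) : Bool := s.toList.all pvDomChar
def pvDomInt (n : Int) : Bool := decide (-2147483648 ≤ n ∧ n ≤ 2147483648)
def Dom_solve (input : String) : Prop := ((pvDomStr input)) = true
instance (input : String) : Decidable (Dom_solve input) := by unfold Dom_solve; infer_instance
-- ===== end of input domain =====

-- B replaces A's single interleaved simulation loop by three passes: record the register
-- values per cycle, then compute the signal-strength sum and the screen from that list
-- (objective: alternative decomposition, same cost).

-- ===== PORT A =====
-- one step of A's loop body; state = (X, clock, part_1, part_2, crt)
def solveStep : (Int × Int × Int × String × Int) → String → (Int × Int × Int × String × Int)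
  | (X, clock, p1, p2, crt), line =>
    let crt2 := if PySem.Int.mod (clock - 1) 40 == 0 then 0 else crt
    let p2a := if PySem.Int.mod (clock - 1) 40 == 0 then p2 ++ "\n" else p2
    let p2b := if (X - crt2).natAbs ≤ 1 then p2a ++ "#" else p2a ++ "."
    let X2 := if PySem.Str.strIsalpha line then X
              else X + (PySem.Int.ofStr? line).getD 0   -- int(line): raises outside Pre_solve
    let clock2 := clock + 1
    let crt3 := crt2 + 1
    let p1b := if PySem.Int.mod clock2 40 == 20 then p1 + clock2 * X2 else p1
    (X2, clock2, p1b, p2b, crt3)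

def solve (input : String) : Int × String :=
  let r := ((PySem.Str.split? (PySem.Str.replace input " " "\n") "\n").getD []).foldl
    solveStep (1, 1, 0, "", 0)
  (r.2.2.1, r.2.2.2.1)

-- ===== PORT B =====
def solve_alt (input : String) : Int × String :=
  let tokens := (PySem.Str.split? (PySem.Str.replace input " " "\n") "\n").getD []
  -- pass 1: xs = X at the start of every cycle, plus the final X
  let p := tokens.foldl
    (fun (s : Int × List Int) tok =>
      (if PySem.Str.strIsalpha tok then s.1
       else s.1 + (PySem.Int.ofStr? tok).getD 0,       -- int(tok): raises outside Pre_solve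
       s.2 ++ [s.1]))
    (1, [])
  let xs := p.2 ++ [p.1]
  -- pass 2: signal strengths at cycles 20, 60, 100, ...
  let p1 := (PySem.List.enumerate xs 1).foldl
    (fun acc cv => if PySem.Int.mod cv.1 40 == 20 then acc + cv.1 * cv.2 else acc) 0
  -- pass 3: draw the screen; pixel i (0-based) sits at column i % 40
  let p2 := (PySem.List.enumerate (PySem.List.slice xs none (some (-1))) 0).foldl
    (fun acc iv =>
      let acc2 := if PySem.Int.mod iv.1 40 == 0 then acc ++ "\n" else acc
      if (iv.2 - PySem.Int.mod iv.1 40).natAbs ≤ 1 then acc2 ++ "#" else acc2 ++ ".")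
    ""
  (p1, p2)

-- ===== PRECONDITION & SPEC =====
-- Pre_solve: every token is alphabetic or parses as an int — exactly where A's int(line)
-- (and B's int(tok)) does not raise ValueError (e.g. it excludes "" and trailing newlines).
def Pre_solve (input : String) : Prop :=
  ∀ t ∈ (PySem.Str.split? (PySem.Str.replace input " " "\n") "\n").getD [],
    PySem.Str.strIsalpha t = true ∨ (PySem.Int.ofStr? t).isSome = true
instance (input : String) : Decidable (Pre_solve input) := by unfold Pre_solve; infer_instance
def pvWitness_solve : String := "noop\naddx 3"

def Spec_solve (input : String) (out : Int × String) : Prop := out = solve_alt input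
instance (input : String) (out : Int × String) : Decidable (Spec_solve input out) := by unfold Spec_solve; infer_instance

-- ===== CLAIM (what is proved, stated in full; the proofs are below) =====
def Claim_equal_solve : Prop := ∀ (input : String), Dom_solve input → Pre_solve input → Spec_solve input (solve input)

-- ===== LEMMAS AND PROOFS =====

-- X after one instruction
def nextX (x : Int) (t : String) : Int :=
  if PySem.Str.strIsalpha t then x else x + (PySem.Int.ofStr? t).getD 0

-- the register value at the start of each cycle, plus the final value
def xsOf (x : Int) : List String → List Int
  | [] => [x]
  | t :: ts => x :: xsOf (nextX x t) ts

-- what one cycle appends to the screen, 0-based cycle index i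
def emit2 (x i : Int) : String :=
  (if PySem.Int.mod i 40 == 0 then "\n" else "") ++
  (if (x - PySem.Int.mod i 40).natAbs ≤ 1 then "#" else ".")

-- A's part_1 contributions from the remaining cycles, clock = current cycle (1-based)
def P1 : List Int → Int → Int
  | _ :: y :: r, c => (if PySem.Int.mod (c + 1) 40 == 20 then (c + 1) * y else 0) + P1 (y :: r) (c + 1)
  | _, _ => 0

-- A's part_2 contributions from the remaining cycles
def P2 : List Int → Int → String
  | x :: y :: r, c => emit2 x (c - 1) ++ P2 (y :: r) (c + 1)
  | _, _ => ""

-- B's pass-2 sum, c = 1-based index of the first element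
def S : List Int → Int → Int
  | [], _ => 0
  | x :: r, c => (if PySem.Int.mod c 40 == 20 then c * x else 0) + S r (c + 1)

-- B's pass-3 screen, i = 0-based index of the first element
def T : List Int → Int → String
  | [], _ => ""
  | x :: r, i => emit2 x i ++ T r (i + 1)

lemma P1_cons_xsOf (x x2 : Int) (ts : List String) (c : Int) :
    P1 (x :: xsOf x2 ts) c
      = (if PySem.Int.mod (c + 1) 40 == 20 then (c + 1) * x2 else 0) + P1 (xsOf x2 ts) (c + 1) := by
  cases ts <;> simp [xsOf, P1]

lemma P2_cons_xsOf (x x2 : Int) (ts : List String) (c : Int) :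
    P2 (x :: xsOf x2 ts) c = emit2 x (c - 1) ++ P2 (xsOf x2 ts) (c + 1) := by
  cases ts <;> simp [xsOf, P2]

-- main invariant for A's loop
lemma foldA (ts : List String) : ∀ (X clock p1 : Int) (p2 : String) (crt : Int), 0 < clock →
    (PySem.Int.mod (clock - 1) 40 ≠ 0 → crt = PySem.Int.mod (clock - 1) 40) →
    ∃ X' clock' crt', ts.foldl solveStep (X, clock, p1, p2, crt)
      = (X', clock', p1 + P1 (xsOf X ts) clock, p2 ++ P2 (xsOf X ts) clock, crt') := by
  induction ts with
  | nil =>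
    intro X clock p1 p2 crt _ _
    exact ⟨X, clock, crt, by simp [xsOf, P1, P2]⟩
  | cons t ts ih =>
    intro X clock p1 p2 crt hc hcrt
    have h40 : (0 : Int) < 40 := by norm_num
    simp only [List.foldl_cons, solveStep]
    set m := PySem.Int.mod (clock - 1) 40 with hmdef
    -- the crt actually used this cycle equals m
    have hcrt2 : (if m == 0 then (0 : Int) else crt) = m := by
      by_cases h : m = 0
      · simp [h]
      · simp [h, hcrt h]
    -- invariant for the next cycle
    have hnext : PySem.Int.mod (clock + 1 - 1) 40 ≠ 0 →
        (if m == 0 then (0 : Int) else crt) + 1 = PySem.Int.mod (clock + 1 - 1) 40 := by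
      intro h
      rw [hcrt2]
      have e : clock + 1 - 1 = clock := by ring
      rw [e] at h ⊢
      rw [PySem.Int.mod_eq_emod_of_pos h40] at h ⊢
      rw [hmdef, PySem.Int.mod_eq_emod_of_pos h40]
      omega
    obtain ⟨X', clock', crt', hfold⟩ :=
      ih (nextX X t) (clock + 1)
        (p1 + (if PySem.Int.mod (clock + 1) 40 == 20 then (clock + 1) * nextX X t else 0))
        (p2 ++ emit2 X (clock - 1)) ((if m == 0 then (0 : Int) else crt) + 1)
        (by omega) hnext
    refine ⟨X', clock', crt', ?_⟩
    -- the screen piece this cycle appends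
    have hbody :
        ((if (X - (if m == 0 then (0:Int) else crt)).natAbs ≤ 1
            then (if m == 0 then p2 ++ "\n" else p2) ++ "#"
            else (if m == 0 then p2 ++ "\n" else p2) ++ ".")
          : String) = p2 ++ emit2 X (clock - 1) := by
      rw [hcrt2]
      unfold emit2
      rw [← hmdef]
      by_cases h : m = 0
      · simp only [h, sub_zero]
        by_cases h2 : X.natAbs ≤ 1 <;> simp [h2, String.append_assoc]
      · by_cases h2 : (X - m).natAbs ≤ 1 <;> simp [h, h2]
    -- the part_1 update as an added term
    have hX2 : (if PySem.Str.strIsalpha t then X else X + (PySem.Int.ofStr? t).getD 0) = nextX X t := rfl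
    have hp1 : (if PySem.Int.mod (clock + 1) 40 == 20 then p1 + (clock + 1) * nextX X t else p1)
        = p1 + (if PySem.Int.mod (clock + 1) 40 == 20 then (clock + 1) * nextX X t else 0) := by
      split_ifs <;> simp
    rw [hX2, hp1, hbody, hfold]
    simp only [xsOf]
    rw [P1_cons_xsOf, P2_cons_xsOf]
    simp [add_assoc, String.append_assoc]

-- B's pass 1 builds xsOf
lemma foldB (ts : List String) : ∀ (x : Int) (acc : List Int),
    (ts.foldl (fun (s : Int × List Int) tok =>
        (if PySem.Str.strIsalpha tok then s.1
         else s.1 + (PySem.Int.ofStr? tok).getD 0, s.2 ++ [s.1])) (x, acc)).2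
      ++ [(ts.foldl (fun (s : Int × List Int) tok =>
        (if PySem.Str.strIsalpha tok then s.1
         else s.1 + (PySem.Int.ofStr? tok).getD 0, s.2 ++ [s.1])) (x, acc)).1]
      = acc ++ xsOf x ts := by
  induction ts with
  | nil => intro x acc; simp [xsOf]
  | cons t ts ih =>
    intro x acc
    simp only [List.foldl_cons]
    rw [ih (if PySem.Str.strIsalpha t then x else x + (PySem.Int.ofStr? t).getD 0) (acc ++ [x])]
    simp [xsOf, nextX]

-- B's pass 2 is S
lemma foldS (xs : List Int) : ∀ (c acc : Int),
    (PySem.List.enumerate xs c).foldl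
        (fun acc cv => if PySem.Int.mod cv.1 40 == 20 then acc + cv.1 * cv.2 else acc) acc
      = acc + S xs c := by
  induction xs with
  | nil => intro c acc; simp [S, PySem.List.enumerate_nil]
  | cons x r ih =>
    intro c acc
    rw [PySem.List.enumerate_cons]
    simp only [List.foldl_cons]
    rw [ih]
    simp only [S]
    split_ifs <;> ring

-- one iteration of B's pass 3 appends emit2
lemma step_emit (acc : String) (x i : Int) :
    (if (x - PySem.Int.mod i 40).natAbs ≤ 1
       then (if PySem.Int.mod i 40 == 0 then acc ++ "\n" else acc) ++ "#"
       else (if PySem.Int.mod i 40 == 0 then acc ++ "\n" else acc) ++ ".")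
      = acc ++ emit2 x i := by
  unfold emit2
  split_ifs <;> simp [String.append_assoc]

-- B's pass 3 is T
lemma foldT (xs : List Int) : ∀ (i : Int) (acc : String),
    (PySem.List.enumerate xs i).foldl
        (fun acc iv =>
          let acc2 := if PySem.Int.mod iv.1 40 == 0 then acc ++ "\n" else acc
          if (iv.2 - PySem.Int.mod iv.1 40).natAbs ≤ 1 then acc2 ++ "#" else acc2 ++ ".") acc
      = acc ++ T xs i := by
  induction xs with
  | nil => intro i acc; simp [T, PySem.List.enumerate_nil]
  | cons x r ih =>
    intro i acc
    rw [PySem.List.enumerate_cons]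
    simp only [List.foldl_cons]
    rw [ih]
    simp only [T]
    rw [← String.append_assoc]
    congr 1
    exact step_emit acc x i

-- the two part_1 computations agree
lemma P1_eq_S (xs : List Int) : ∀ c : Int, P1 xs c = S xs.tail (c + 1) := by
  induction xs with
  | nil => intro c; simp [P1, S]
  | cons x r ih =>
    intro c
    cases r with
    | nil => simp [P1, S]
    | cons y r' =>
      simp only [P1, List.tail_cons, S]
      rw [ih (c + 1)]
      simp

-- the two part_2 computations agree
lemma P2_eq_T (xs : List Int) : ∀ c : Int, P2 xs c = T xs.dropLast (c - 1) := by
  induction xs with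
  | nil => intro c; simp [P2, T]
  | cons x r ih =>
    intro c
    cases r with
    | nil => simp [P2, T]
    | cons y r' =>
      simp only [P2, List.dropLast_cons₂, T]
      rw [ih (c + 1)]
      have e : c + 1 - 1 = c - 1 + 1 := by ring
      rw [e]

lemma xsOf_head (x : Int) (ts : List String) : ∃ tl, xsOf x ts = x :: tl := by
  cases ts <;> exact ⟨_, rfl⟩

-- ===== VERDICT (by name: the statement is the Claim_ definition above) =====
set_option maxHeartbeats 1000000 in
theorem solve_spec : Claim_equal_solve := by
  intro input _ _
  unfold Spec_solve solve solve_alt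
  set toks := (PySem.Str.split? (PySem.Str.replace input " " "\n") "\n").getD [] with htoks
  -- A's loop computes P1 and P2 of the cycle-value list
  obtain ⟨X', clock', crt', hA⟩ :=
    foldA toks 1 1 0 "" 0 (by norm_num) (by intro h; exact absurd rfl h)
  rw [hA]
  -- B's three passes compute xsOf, S and T
  have hB := foldB toks 1 []
  simp only [List.nil_append] at hB
  simp only [PySem.List.slice_to_neg_one]
  rw [hB, foldS, foldT]
  obtain ⟨tl, hhead⟩ := xsOf_head 1 toks
  simp only [Prod.mk.injEq]
  constructor
  · -- part_1
    rw [P1_eq_S, hhead]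
    simp [S]
  · -- part_2
    rw [P2_eq_T]
    norm_num
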